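-- pv_equiv track=rewrite | github.com/hacaksh/password-analyzer | main.py | normalize_leet
-- ===== SOURCE A (Python) =====
-- LEET_MAP = {
--     # ---------------- MULTI-CHAR PATTERNS (checked first) ----------------
--     "|3": "b",
--     "13": "b",
--     "|}": "d",
--     "|>": "k",
--     "|<": "k",
--     "|(": "k",
--     "|]": "d",
--     "|)": "d",
--     "|0": "d",
--     "|=": "f",
--     "|_": "l",
--     "|\\|": "n",
--     "|V": "n",
--     "|/": "y",
--     "|\\": "y",
--     "|<|": "h",         # hacky but used
--     "ph": "f",
--     "|-|": "h",
--     "]-[": "h",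
--     ")-(": "h",
--     "<-<": "k",
--     "vv": "w",
--     "\\/\\/": "w",
--     "\\/\\/" : "w",
--     "\\/": "v",
--     "><": "x",
--     ")(": "c",
--     "}{": "h",
--     "]['": "n",
--
--     # ---------------- SINGLE-CHAR MAPPINGS ----------------
--     "0": "o",
--     "1": "i",    # choose i (more accurate for dictionary detection)
--     "!": "i",
--     "|": "i",
--     "2": "z",
--     "3": "e",
--     "4": "a",
--     "@": "a",
--     "5": "s",
--     "$": "s",
--     "6": "g",
--     "7": "t",
--     "+": "t",
--     "8": "b",
--     "9": "g",
--     "(": "c",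
--     "<": "c",
--     "{": "c",
--     "[": "c",
--     "]": "c",
--     "}": "c",
--     "?": "q",
--
--     # ---------------- OTHER SYMBOLIC SUBS ----------------
--     "#": "h",
--     "%": "x",
--     "&": "and",
--     "*": "",       # often filler
--     ".": "",
--     "-": "",
--     "_": "",
-- }
--
-- def normalize_leet(s: str) -> str:
--     """Return a simplified leet-normalized version of s."""
--     normalized = []
--     for ch in s.lower():
--         if ch in LEET_MAP:
--             normalized.append(LEET_MAP[ch])
--         else:
--             normalized.append(ch)
--     return "".join(normalized)
-- ===== SOURCE B (Python) =====
-- # Staged whole-string substitution passes instead of A's per-character loop.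
-- # Correct because every replacement target is letters-only (or empty) while every
-- # pattern is a non-letter character, so the passes cannot interact.
-- _SUBS = [
--     ("0", "o"), ("1", "i"), ("!", "i"), ("|", "i"), ("2", "z"), ("3", "e"),
--     ("4", "a"), ("@", "a"), ("5", "s"), ("$", "s"), ("6", "g"), ("7", "t"),
--     ("+", "t"), ("8", "b"), ("9", "g"), ("(", "c"), ("<", "c"), ("{", "c"),
--     ("[", "c"), ("]", "c"), ("}", "c"), ("?", "q"), ("#", "h"), ("%", "x"),
--     ("&", "and"), ("*", ""), (".", ""), ("-", ""), ("_", ""),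
-- ]
--
-- def normalize_leet(s: str) -> str:
--     """Return a simplified leet-normalized version of s."""
--     s = s.lower()
--     for old, new in _SUBS:
--         s = s.replace(old, new)
--     return s
-- ===== Notes on version B (the rewrite author's own statement) =====
-- stated objective: alternative
-- what changed: Replaces A's single per-character dict-lookup-and-append loop by a sequence of 29 whole-string str.replace passes, one per reachable substitution (after lowercasing); correct because no replacement target contains any pattern character, so the passes are independent; the passes run inside the C runtime instead of a Python-level loop.
import Mathlib
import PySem

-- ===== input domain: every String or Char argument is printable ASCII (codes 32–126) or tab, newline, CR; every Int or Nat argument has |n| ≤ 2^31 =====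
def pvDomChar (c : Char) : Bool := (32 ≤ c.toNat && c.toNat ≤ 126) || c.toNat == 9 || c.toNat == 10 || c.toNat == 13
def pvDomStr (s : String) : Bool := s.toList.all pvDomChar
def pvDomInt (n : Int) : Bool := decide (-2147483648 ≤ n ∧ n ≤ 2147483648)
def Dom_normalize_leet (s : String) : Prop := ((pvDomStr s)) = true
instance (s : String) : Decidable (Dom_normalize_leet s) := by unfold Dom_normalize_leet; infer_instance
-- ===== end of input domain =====

set_option maxRecDepth 20000


-- B replaces A's single per-character dict-lookup loop by staged whole-string
-- replace passes, one per reachable substitution; objective: alternative.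

-- ===== PORT A =====
def LEET_MAP : PySem.Dict String String := PySem.Dict.ofList [
  ("|3", "b"), ("13", "b"), ("|}", "d"), ("|>", "k"), ("|<", "k"), ("|(", "k"),
  ("|]", "d"), ("|)", "d"), ("|0", "d"), ("|=", "f"), ("|_", "l"), ("|\\|", "n"),
  ("|V", "n"), ("|/", "y"), ("|\\", "y"), ("|<|", "h"), ("ph", "f"), ("|-|", "h"),
  ("]-[", "h"), (")-(", "h"), ("<-<", "k"), ("vv", "w"), ("\\/\\/", "w"),
  ("\\/", "v"), ("><", "x"), (")(", "c"), ("}{", "h"), ("]['", "n"),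
  ("0", "o"), ("1", "i"), ("!", "i"), ("|", "i"), ("2", "z"), ("3", "e"),
  ("4", "a"), ("@", "a"), ("5", "s"), ("$", "s"), ("6", "g"), ("7", "t"),
  ("+", "t"), ("8", "b"), ("9", "g"), ("(", "c"), ("<", "c"), ("{", "c"),
  ("[", "c"), ("]", "c"), ("}", "c"), ("?", "q"),
  ("#", "h"), ("%", "x"), ("&", "and"), ("*", ""), (".", ""), ("-", ""), ("_", "")]

def normalize_leet (s : String) : String :=
  let normalized : List String :=
    (PySem.Str.lower s).toList.foldl
      (fun acc ch =>
        let chS := String.ofList [ch]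
        if LEET_MAP.contains chS then acc ++ [LEET_MAP.getD chS chS]
        else acc ++ [chS]) []
  PySem.Str.join "" normalized

-- ===== PORT B =====
-- Source B's _SUBS list, in the same order
def SUBS : List (String × String) := [
  ("0", "o"), ("1", "i"), ("!", "i"), ("|", "i"), ("2", "z"), ("3", "e"),
  ("4", "a"), ("@", "a"), ("5", "s"), ("$", "s"), ("6", "g"), ("7", "t"),
  ("+", "t"), ("8", "b"), ("9", "g"), ("(", "c"), ("<", "c"), ("{", "c"),
  ("[", "c"), ("]", "c"), ("}", "c"), ("?", "q"), ("#", "h"), ("%", "x"),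
  ("&", "and"), ("*", ""), (".", ""), ("-", ""), ("_", "")]

def normalize_leet_alt (s : String) : String :=
  SUBS.foldl (fun t p => PySem.Str.replace t p.1 p.2) (PySem.Str.lower s)

-- ===== PRECONDITION & SPEC =====
def Spec_normalize_leet (s : String) (out : String) : Prop := out = normalize_leet_alt s
instance (s : String) (out : String) : Decidable (Spec_normalize_leet s out) := by unfold Spec_normalize_leet; infer_instance

-- ===== CLAIM (what is proved, stated in full; the proofs are below) =====
def Claim_equal_normalize_leet : Prop := ∀ (s : String), Dom_normalize_leet s → Spec_normalize_leet s (normalize_leet s)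

-- ===== LEMMAS AND PROOFS =====

-- "".join concatenates: Chars.join with the empty separator is flatten
theorem join_empty (l : List (List Char)) : PySem.Chars.join [] l = l.flatten := by
  induction l with
  | nil => rfl
  | cons x xs ih =>
    cases xs with
    | nil => simp [PySem.Chars.join, List.intercalate]
    | cons y ys =>
      simp only [PySem.Chars.join, List.intercalate, List.intersperse,
        List.flatten_cons] at ih ⊢
      simp [ih]

-- A's per-character action, as a function
def stepA (c : Char) : String :=
  let chS := String.ofList [c]
  if LEET_MAP.contains chS then LEET_MAP.getD chS chS else chS

theorem foldl_stepA (cs : List Char) :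
    ∀ acc : List String,
      cs.foldl (fun acc ch =>
        let chS := String.ofList [ch]
        if LEET_MAP.contains chS then acc ++ [LEET_MAP.getD chS chS]
        else acc ++ [chS]) acc = acc ++ cs.map stepA := by
  induction cs with
  | nil => simp
  | cons c cs ih =>
      intro acc
      simp only [List.foldl_cons, List.map_cons, ih, stepA]
      by_cases h : LEET_MAP.contains (String.ofList [c]) = true <;> simp [h]

-- replacing a SINGLE-character pattern acts pointwise
theorem replace_go_single (a : Char) (new : List Char) :
    ∀ (l acc : List Char),
      PySem.Chars.replace.go [a] new l.length l acc =
        acc.reverse ++ l.flatMap (fun c => if c == a then new else [c]) := by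
  intro l
  induction l with
  | nil => intro acc; simp [PySem.Chars.replace.go]
  | cons c t ih =>
      intro acc
      simp only [List.length_cons, PySem.Chars.replace.go, List.flatMap_cons]
      by_cases h : c = a
      · subst h
        have hp : [c].isPrefixOf (c :: t) = true := by simp [List.isPrefixOf]
        simp [hp, ih, List.reverse_append]
      · have hp : [a].isPrefixOf (c :: t) = false := by
          simp [List.isPrefixOf]; exact fun e => h e.symm
        simp [hp, h, ih]
theorem replace_single (l : List Char) (a : Char) (new : List Char) :
    PySem.Chars.replace l [a] new = l.flatMap (fun c => if c == a then new else [c]) := by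
  simp [PySem.Chars.replace, replace_go_single]

-- Source B's substitution table on chars, used only by the proofs
def SUBSC : List (Char × List Char) := [
  ('0', ['o']), ('1', ['i']), ('!', ['i']), ('|', ['i']), ('2', ['z']), ('3', ['e']),
  ('4', ['a']), ('@', ['a']), ('5', ['s']), ('$', ['s']), ('6', ['g']), ('7', ['t']),
  ('+', ['t']), ('8', ['b']), ('9', ['g']), ('(', ['c']), ('<', ['c']), ('{', ['c']),
  ('[', ['c']), (']', ['c']), ('}', ['c']), ('?', ['q']), ('#', ['h']), ('%', ['x']),
  ('&', ['a','n','d']), ('*', []), ('.', []), ('-', []), ('_', [])]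

-- the whole replace chain, applied to a single character
def charRepl (subs : List (Char × List Char)) (c : Char) : List Char :=
  subs.foldl (fun l p => PySem.Chars.replace l [p.1] p.2) [c]

theorem foldl_replace_flatMap (subs : List (Char × List Char)) :
    ∀ l : List Char,
      subs.foldl (fun l p => PySem.Chars.replace l [p.1] p.2) l =
        l.flatMap (charRepl subs) := by
  induction subs with
  | nil =>
      intro l
      simp only [List.foldl_nil]
      exact (List.flatMap_singleton' l).symm
  | cons p ps ih =>
      intro l
      rw [List.foldl_cons, ih, replace_single, List.flatMap_assoc]
      congr 1
      funext c
      rw [show charRepl (p :: ps) c = List.foldl (fun l p => PySem.Chars.replace l [p.1] p.2)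
            (PySem.Chars.replace [c] [p.1] p.2) ps from rfl, ih, replace_single]
      simp

-- bridge: the Str-level fold of Source B is the Chars-level fold of its table
theorem strfold_bridge (subs : List (Char × List Char)) :
    ∀ t : String,
      ((subs.map (fun p => (String.ofList [p.1], String.ofList p.2))).foldl
          (fun t p => PySem.Str.replace t p.1 p.2) t).toList =
        subs.foldl (fun l p => PySem.Chars.replace l [p.1] p.2) t.toList := by
  induction subs with
  | nil => intro t; simp
  | cons p ps ih =>
      intro t
      rw [List.map_cons, List.foldl_cons, ih]
      have hstep : (PySem.Str.replace t (String.ofList [p.1]) (String.ofList p.2)).toList =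
          PySem.Chars.replace t.toList [p.1] p.2 := by
        simp [PySem.Str.replace, String.toList_ofList]
      rw [hstep]
      rfl

theorem alt_eq (s : String) :
    (normalize_leet_alt s).toList =
      SUBSC.foldl (fun l p => PySem.Chars.replace l [p.1] p.2)
        (PySem.Chars.lower s.toList) := by
  have hmap : SUBS = SUBSC.map (fun p => (String.ofList [p.1], String.ofList p.2)) := rfl
  rw [normalize_leet_alt, hmap, strfold_bridge, PySem.Str.toList_lower]

-- A's step and B's chain agree on every (lowered) domain character
set_option maxHeartbeats 2000000 in
theorem step_agree (c : Char) (h : pvDomChar c = true) :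
    (stepA (PySem.Chars.lowerChar c)).toList = charRepl SUBSC (PySem.Chars.lowerChar c) := by
  have hb : c.toNat < 127 := by
    simp only [pvDomChar, Bool.or_eq_true, Bool.and_eq_true, decide_eq_true_eq, beq_iff_eq] at h
    omega
  have hall : (List.range 127).all
      (fun n => (stepA (PySem.Chars.lowerChar (Char.ofNat n))).toList ==
        charRepl SUBSC (PySem.Chars.lowerChar (Char.ofNat n))) = true := by decide
  have := List.all_eq_true.mp hall c.toNat (List.mem_range.mpr hb)
  simpa [Char.ofNat_toNat] using this

set_option maxHeartbeats 2000000 in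
theorem normalize_leet_spec : Claim_equal_normalize_leet := by
  intro s hdom
  unfold Spec_normalize_leet
  apply String.toList_injective
  unfold normalize_leet
  simp only [foldl_stepA, List.nil_append]
  rw [alt_eq, foldl_replace_flatMap]
  rw [PySem.Str.toList_join]
  rw [show ("" : String).toList = [] from rfl, join_empty]
  have hchars : ∀ c ∈ s.toList, pvDomChar c = true := List.all_eq_true.mp hdom
  rw [PySem.Str.toList_lower]
  unfold PySem.Chars.lower
  simp only [List.map_map, Function.comp_def, List.flatMap_def]
  apply congrArg List.flatten
  apply List.map_congr_left
  intro c hc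
  exact step_agree c (hchars c hc)
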